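-- pv_equiv track=rewrite | github.com/dgseten/bad-cv-tfm | tools/download/downloader.py | reduce_videos_to_download
-- ===== SOURCE A (Python) =====
-- def split_list(a_list):
--     half = len(a_list)//2
--     return a_list[:half], a_list[half:]
--
-- def reduce_videos_to_download(videos_list, max_videos_to_download):
--     final_videos_list = []
--     lists_parts = []
--     lists_parts.append(videos_list)
--     max_videos_to_download = min(len(videos_list),max_videos_to_download)
--     while True:
--         for part in lists_parts:
--             middle_idx = int(float(len(part))/2-.5)
--             final_videos_list.append(part[middle_idx])
--             if len(final_videos_list)>=max_videos_to_download: return final_videos_list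
--             del part[middle_idx]
--         lists_parts_aux = []
--         for part in lists_parts:
--             a,b = split_list(part)
--             lists_parts_aux.append(a)
--             lists_parts_aux.append(b)
--         lists_parts = lists_parts_aux
-- ===== SOURCE B (Python) =====
-- def reduce_videos_to_download(videos_list, max_videos_to_download):
--     # BFS over (lo, hi) index intervals: emit the middle index of each interval,
--     # then recurse on the two halves; no list copying or deletion.
--     if not videos_list:
--         return []
--     need = min(len(videos_list), max_videos_to_download)
--     out = []
--     level = [(0, len(videos_list))]
--     while level:
--         next_level = []
--         for lo, hi in level:
--             if lo >= hi:
--                 continue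
--             mid = (lo + hi - 1) // 2
--             out.append(videos_list[mid])
--             if len(out) >= need:
--                 return out
--             next_level.append((lo, mid))
--             next_level.append((mid + 1, hi))
--         level = next_level
--     return out
-- ===== Notes on version B (the rewrite author's own statement) =====
-- stated objective: faster
-- what changed: B replaces A's BFS over materialized sublists (which copies halves with slicing and deletes middles with del) by a BFS over (lo,hi) index intervals that emits videos_list[(lo+hi-1)//2] directly, so no list is ever copied or mutated.
-- outside the precondition, e.g. on reduce_videos_to_download([], 0): A raises IndexError, B returns []; on reduce_videos_to_download(['a', 'b'], 2): A raises IndexError, B returns ['a', 'b']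
-- crash fix: A raises IndexError on the empty list and whenever min(len(videos_list), max_videos_to_download) exceeds 2^floor(log2(len+1))-1 (its breadth-first deletion then indexes an empty sub-part); B returns the min(len, max) selected videos there ([] on the empty list). — e.g. on reduce_videos_to_download(["a", "b"], 2): A raises IndexError, B returns ["a", "b"]
import Mathlib
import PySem

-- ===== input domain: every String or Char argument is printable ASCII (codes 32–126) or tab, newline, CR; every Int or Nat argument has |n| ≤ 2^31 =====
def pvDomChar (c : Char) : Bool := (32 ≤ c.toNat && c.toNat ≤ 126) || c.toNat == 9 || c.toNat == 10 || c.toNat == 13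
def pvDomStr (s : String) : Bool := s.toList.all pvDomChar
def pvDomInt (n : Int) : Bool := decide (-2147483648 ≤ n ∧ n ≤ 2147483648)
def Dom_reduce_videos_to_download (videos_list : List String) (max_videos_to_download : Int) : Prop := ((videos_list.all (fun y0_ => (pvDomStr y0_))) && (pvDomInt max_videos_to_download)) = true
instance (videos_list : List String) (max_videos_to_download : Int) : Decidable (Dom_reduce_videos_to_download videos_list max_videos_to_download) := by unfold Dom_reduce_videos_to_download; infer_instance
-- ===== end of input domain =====

-- B replaces A's list copying/deleting BFS by BFS over (lo,hi) index intervals (no slicing, no deletion).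
-- Note: Python A mutates videos_list in place (del); the equivalence proved here is about the RETURN value only (B does not mutate).

-- ===== PORT A =====

def pvSplit_list (a_list : List String) : List String × List String :=
  (a_list.take (a_list.length / 2), a_list.drop (a_list.length / 2))

-- first inner for-loop of A: emit the middle of each part, delete it; early return = Sum.inl
-- (an empty part means IndexError in Python — excluded by Pre_; the port returns the current list there)
def pvAEmit (eff : Int) (final : List String) (parts : List (List String)) (acc : List (List String)) :
    List String ⊕ (List String × List (List String)) :=
  match parts with
  | [] => Sum.inr (final, acc)
  | part :: rest =>
    -- middle_idx = int(float(len(part))/2-.5) = (len(part)-1)//2  (Nat subtraction gives 0 on the empty part, as Python does)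
    let mid := (part.length - 1) / 2
    match PySem.List.pyGet? part (mid : Int) with
    | none => Sum.inl final            -- IndexError (outside Pre_)
    | some x =>
      let final' := final ++ [x]
      if (final'.length : Int) ≥ eff then Sum.inl final'
      else pvAEmit eff final' rest (acc ++ [part.eraseIdx mid])

-- the while-True loop of A; fuel only makes the loop total (the entry point supplies provably
-- enough fuel: each pass removes one element per part, so the loop runs < length + 2 times)
def pvALoop (eff : Int) (final : List String) (parts : List (List String)) : Nat → List String
  | 0 => final
  | fuel + 1 =>
    match pvAEmit eff final parts [] with
    | Sum.inl res => res
    | Sum.inr (final', parts') =>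
      pvALoop eff final' (parts'.foldl (fun aux p => aux ++ [(pvSplit_list p).1, (pvSplit_list p).2]) []) fuel

def reduce_videos_to_download (videos_list : List String) (max_videos_to_download : Int) : List String :=
  pvALoop (min (videos_list.length : Int) max_videos_to_download) [] [videos_list] (videos_list.length + 2)

-- ===== PORT B =====

-- the inner for-loop of B: emit videos[mid] for each nonempty interval, queue the two halves
def pvBLevel (videos : List String) (need : Int) (out : List String)
    (level : List (Nat × Nat)) (nxt : List (Nat × Nat)) :
    List String ⊕ (List String × List (Nat × Nat)) :=
  match level with
  | [] => Sum.inr (out, nxt)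
  | (lo, hi) :: rest =>
    if lo ≥ hi then pvBLevel videos need out rest nxt
    else
      let mid := (lo + hi - 1) / 2
      -- mid is always in range at call sites (lo < hi ≤ len videos), so getD's default is never used
      let out' := out ++ [(PySem.List.pyGet? videos (mid : Int)).getD ""]
      if (out'.length : Int) ≥ need then Sum.inl out'
      else pvBLevel videos need out' rest (nxt ++ [(lo, mid), (mid + 1, hi)])

-- the 'while level:' loop of B; fuel only makes the loop total (the entry point supplies provably
-- enough fuel: interval widths at least halve from one level to the next)
def pvBLoop (videos : List String) (need : Int) (out : List String) (level : List (Nat × Nat)) : Nat → List String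
  | 0 => out
  | fuel + 1 =>
    if level = [] then out
    else
      match pvBLevel videos need out level [] with
      | Sum.inl res => res
      | Sum.inr (out', nxt) => pvBLoop videos need out' nxt fuel

def reduce_videos_to_download_alt (videos_list : List String) (max_videos_to_download : Int) : List String :=
  if videos_list = [] then []
  else pvBLoop videos_list (min (videos_list.length : Int) max_videos_to_download) [] [(0, videos_list.length)]
    (videos_list.length + 2)

-- ===== PRECONDITION & SPEC =====
-- Pre_ excludes exactly the inputs on which Python A raises IndexError: the empty list, and any
-- max_videos_to_download whose effective count min(len, max) exceeds 2^⌊log2(len+1)⌋ - 1 — there A's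
-- breadth-first deletion reaches an empty sub-part and indexes it. A returns on every other input.
def Pre_reduce_videos_to_download (videos_list : List String) (max_videos_to_download : Int) : Prop :=
  videos_list ≠ [] ∧
  min (videos_list.length : Int) max_videos_to_download ≤ 2 ^ Nat.log2 (videos_list.length + 1) - 1

instance (videos_list : List String) (max_videos_to_download : Int) : Decidable (Pre_reduce_videos_to_download videos_list max_videos_to_download) := by unfold Pre_reduce_videos_to_download; infer_instance

def pvWitness_reduce_videos_to_download : List String × Int := (["a", "b", "c"], 2)

-- A raises IndexError exactly on the inputs Pre_ excludes; B returns the min(len,max) selected videos there (or [] on the empty list).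
def Raises_reduce_videos_to_download (videos_list : List String) (max_videos_to_download : Int) : Prop :=
  videos_list = [] ∨
  min (videos_list.length : Int) max_videos_to_download > 2 ^ Nat.log2 (videos_list.length + 1) - 1

instance (videos_list : List String) (max_videos_to_download : Int) : Decidable (Raises_reduce_videos_to_download videos_list max_videos_to_download) := by unfold Raises_reduce_videos_to_download; infer_instance

def pvRaiseWitness_reduce_videos_to_download : List String × Int := (["a", "b"], 2)
def pvRaiseWitnessOut_reduce_videos_to_download : List String := ["a", "b"]

def Spec_reduce_videos_to_download (videos_list : List String) (max_videos_to_download : Int) (out : List String) : Prop := out = reduce_videos_to_download_alt videos_list max_videos_to_download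
instance (videos_list : List String) (max_videos_to_download : Int) (out : List String) : Decidable (Spec_reduce_videos_to_download videos_list max_videos_to_download out) := by unfold Spec_reduce_videos_to_download; infer_instance

-- ===== CLAIM (what is proved, stated in full; the proofs are below) =====
def Claim_equal_reduce_videos_to_download : Prop := ∀ (videos_list : List String) (max_videos_to_download : Int), Dom_reduce_videos_to_download videos_list max_videos_to_download → Pre_reduce_videos_to_download videos_list max_videos_to_download → Spec_reduce_videos_to_download videos_list max_videos_to_download (reduce_videos_to_download videos_list max_videos_to_download)

def Claim_raises_reduce_videos_to_download : Prop := (∀ (videos_list : List String) (max_videos_to_download : Int), Dom_reduce_videos_to_download videos_list max_videos_to_download → Raises_reduce_videos_to_download videos_list max_videos_to_download → ¬ Pre_reduce_videos_to_download videos_list max_videos_to_download) ∧ (Dom_reduce_videos_to_download (pvRaiseWitness_reduce_videos_to_download.1) (pvRaiseWitness_reduce_videos_to_download.2) ∧ Raises_reduce_videos_to_download (pvRaiseWitness_reduce_videos_to_download.1) (pvRaiseWitness_reduce_videos_to_download.2) ∧ reduce_videos_to_download_alt (pvRaiseWitness_reduce_videos_to_download.1) (pvRaiseWitness_reduce_videos_to_download.2)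 = pvRaiseWitnessOut_reduce_videos_to_download)

-- ===== LEMMAS AND PROOFS =====

-- the contiguous segment of videos from index lo (inclusive) to hi (exclusive)
def pvSeg (videos : List String) (lo hi : Nat) : List String := (videos.drop lo).take (hi - lo)

def pvSegF (videos : List String) (q : Nat × Nat) : List String := pvSeg videos q.1 q.2

-- the two child intervals B queues for an emitted interval
def pvChild (q : Nat × Nat) : List (Nat × Nat) :=
  [(q.1, (q.1 + q.2 - 1) / 2), ((q.1 + q.2 - 1) / 2 + 1, q.2)]

theorem pvSeg_full (videos : List String) : pvSeg videos 0 videos.length = videos := by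
  simp [pvSeg]

theorem pvSeg_length (videos : List String) {lo hi : Nat} (h2 : hi ≤ videos.length) :
    (pvSeg videos lo hi).length = hi - lo := by
  simp [pvSeg]; omega

theorem pvSeg_getElem? (videos : List String) {lo hi m : Nat} (hm : m < hi - lo) :
    (pvSeg videos lo hi)[m]? = videos[lo + m]? := by
  simp [pvSeg, hm, List.getElem?_drop]

theorem pvSeg_take (videos : List String) {lo hi a : Nat} (ha : a ≤ hi - lo) :
    (pvSeg videos lo hi).take a = pvSeg videos lo (lo + a) := by
  simp only [pvSeg, List.take_take]
  congr 1
  omega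

theorem pvSeg_drop (videos : List String) (lo hi a : Nat) :
    (pvSeg videos lo hi).drop a = pvSeg videos (lo + a) hi := by
  simp only [pvSeg, List.drop_take, List.drop_drop]
  congr 1
  omega

theorem pvSeg_eraseIdx (videos : List String) {lo hi : Nat} (hlo : lo < hi) :
    (pvSeg videos lo hi).eraseIdx ((hi - lo - 1) / 2) =
      pvSeg videos lo (lo + (hi - lo - 1) / 2) ++ pvSeg videos (lo + (hi - lo - 1) / 2 + 1) hi := by
  rw [List.eraseIdx_eq_take_drop_succ, pvSeg_take videos (by omega), pvSeg_drop, ← Nat.add_assoc]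

theorem pvSplit_seg (videos : List String) {lo hi : Nat} (hlo : lo < hi) (hhi : hi ≤ videos.length) :
    pvSplit_list (pvSeg videos lo (lo + (hi - lo - 1) / 2) ++ pvSeg videos (lo + (hi - lo - 1) / 2 + 1) hi) =
      (pvSeg videos lo (lo + (hi - lo - 1) / 2), pvSeg videos (lo + (hi - lo - 1) / 2 + 1) hi) := by
  have h1 : (pvSeg videos lo (lo + (hi - lo - 1) / 2)).length = (hi - lo - 1) / 2 := by
    rw [pvSeg_length videos (by omega)]; omega
  have h2 : (pvSeg videos (lo + (hi - lo - 1) / 2 + 1) hi).length = hi - lo - 1 - (hi - lo - 1) / 2 := by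
    rw [pvSeg_length videos hhi]; omega
  have hhalf : (pvSeg videos lo (lo + (hi - lo - 1) / 2) ++ pvSeg videos (lo + (hi - lo - 1) / 2 + 1) hi).length / 2
      = (pvSeg videos lo (lo + (hi - lo - 1) / 2)).length := by
    rw [List.length_append, h1, h2]; omega
  unfold pvSplit_list
  rw [hhalf, List.take_left, List.drop_left]

theorem pvChild_flatMap_length (L : List (Nat × Nat)) : (L.flatMap pvChild).length = 2 * L.length := by
  induction L with
  | nil => simp
  | cons a t iht => simp [pvChild, iht]; omega

-- one synchronized pass over a level: A's emit-and-delete loop against B's emit-and-queue loop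
theorem pv_emit_sync (videos : List String) (eff : Int) :
    ∀ (level : List (Nat × Nat)) (final : List String) (accA : List (List String)) (accB : List (Nat × Nat)),
    (∀ q ∈ level, q.1 < q.2 ∧ q.2 ≤ videos.length) →
    accA.foldl (fun aux p => aux ++ [(pvSplit_list p).1, (pvSplit_list p).2]) [] = accB.map (pvSegF videos) →
    (match pvAEmit eff final (level.map (pvSegF videos)) accA, pvBLevel videos eff final level accB with
     | Sum.inl a, Sum.inl b => a = b
     | Sum.inr (fa, pa), Sum.inr (fb, nb) =>
         fa = fb ∧ fa.length = final.length + level.length ∧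
         pa.foldl (fun aux p => aux ++ [(pvSplit_list p).1, (pvSplit_list p).2]) [] = nb.map (pvSegF videos) ∧
         nb = accB ++ level.flatMap pvChild ∧
         (level = [] → fa = final) ∧ (level ≠ [] → (fa.length : Int) < eff)
     | _, _ => False) := by
  intro level
  induction level with
  | nil =>
    intro final accA accB hq hacc
    simp only [List.map_nil, pvAEmit, pvBLevel]
    simp [hacc]
  | cons q rest ih =>
    intro final accA accB hq hacc
    obtain ⟨lo, hi⟩ := q
    obtain ⟨hlo, hhi⟩ := hq (lo, hi) (by simp)
    simp only at hlo hhi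
    have hseglen : (pvSegF videos (lo, hi)).length = hi - lo := pvSeg_length videos hhi
    have hmid : lo + (hi - lo - 1) / 2 = (lo + hi - 1) / 2 := by omega
    have hx : PySem.List.pyGet? (pvSegF videos (lo, hi)) ((((pvSegF videos (lo, hi)).length - 1) / 2 : Nat) : Int)
        = videos[(lo + hi - 1) / 2]? := by
      rw [PySem.List.pyGet?_natCast, hseglen]
      show (pvSeg videos lo hi)[(hi - lo - 1) / 2]? = _
      rw [pvSeg_getElem? videos (by omega), hmid]
    have hxB : PySem.List.pyGet? videos ((((lo + hi - 1) / 2 : Nat)) : Int) = videos[(lo + hi - 1) / 2]? :=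
      PySem.List.pyGet?_natCast ..
    have hinrange : (lo + hi - 1) / 2 < videos.length := by omega
    obtain ⟨x, hxv⟩ : ∃ x, videos[(lo + hi - 1) / 2]? = some x :=
      ⟨videos[(lo + hi - 1) / 2], List.getElem?_eq_getElem hinrange⟩
    simp only [List.map_cons, pvAEmit, pvBLevel]
    rw [hx, hxv]
    have hge : ¬ lo ≥ hi := by omega
    rw [if_neg hge, hxB, hxv]
    simp only [Option.getD_some]
    by_cases hc : ((final ++ [x]).length : Int) ≥ eff
    · rw [if_pos hc, if_pos hc]
    · rw [if_neg hc, if_neg hc]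
      have hacc' :
          (accA ++ [(pvSegF videos (lo, hi)).eraseIdx (((pvSegF videos (lo, hi)).length - 1) / 2)]).foldl
            (fun aux p => aux ++ [(pvSplit_list p).1, (pvSplit_list p).2]) []
          = (accB ++ [(lo, (lo + hi - 1) / 2), ((lo + hi - 1) / 2 + 1, hi)]).map (pvSegF videos) := by
        rw [List.foldl_append, hacc, List.map_append]
        simp only [List.foldl_cons, List.foldl_nil, hseglen]
        have herase : (pvSegF videos (lo, hi)).eraseIdx ((hi - lo - 1) / 2)
            = pvSeg videos lo (lo + (hi - lo - 1) / 2) ++ pvSeg videos (lo + (hi - lo - 1) / 2 + 1) hi :=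
          pvSeg_eraseIdx videos hlo
        rw [herase, pvSplit_seg videos hlo hhi]
        simp only [List.map_cons, List.map_nil, pvSegF, hmid]
      have hrest := ih (final ++ [x])
        (accA ++ [(pvSegF videos (lo, hi)).eraseIdx (((pvSegF videos (lo, hi)).length - 1) / 2)])
        (accB ++ [(lo, (lo + hi - 1) / 2), ((lo + hi - 1) / 2 + 1, hi)])
        (fun q hqm => hq q (by simp [hqm])) hacc'
      cases hA : pvAEmit eff (final ++ [x]) (rest.map (pvSegF videos))
          (accA ++ [(pvSegF videos (lo, hi)).eraseIdx (((pvSegF videos (lo, hi)).length - 1) / 2)]) with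
      | inl ra =>
        cases hB : pvBLevel videos eff (final ++ [x]) rest (accB ++ [(lo, (lo + hi - 1) / 2), ((lo + hi - 1) / 2 + 1, hi)]) with
        | inl rb => rw [hA, hB] at hrest; exact hrest
        | inr rb => rw [hA, hB] at hrest; exact absurd hrest (by simp)
      | inr ra =>
        cases hB : pvBLevel videos eff (final ++ [x]) rest (accB ++ [(lo, (lo + hi - 1) / 2), ((lo + hi - 1) / 2 + 1, hi)]) with
        | inl rb => rw [hA, hB] at hrest; exact absurd hrest (by simp)
        | inr rb =>
          rw [hA, hB] at hrest
          obtain ⟨fa, pa⟩ := ra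
          obtain ⟨fb, nb⟩ := rb
          obtain ⟨e1, e2, e3, e4, e5, e6⟩ := hrest
          refine ⟨e1, ?_, e3, ?_, by simp, fun _ => ?_⟩
          · simp only [List.length_append, List.length_cons, List.length_nil] at e2 ⊢
            omega
          · rw [e4]
            simp [pvChild]
          · by_cases hrestnil : rest = []
            · subst hrestnil
              have := e5 rfl
              subst this
              simp only [List.length_append, List.length_cons, List.length_nil] at hc ⊢
              omega
            · exact e6 hrestnil

-- the two loops agree level by level: at level j every interval width + 1 lies in
-- { (n+1)/2^j, (n+1)/2^j + 1 }, so below level log2(n+1) no interval is empty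
theorem pv_loop_sync (videos : List String) (eff : Int) :
    ∀ (fuel j : Nat) (level : List (Nat × Nat)) (final : List String),
    j < Nat.log2 (videos.length + 1) →
    level.length = 2 ^ j →
    (∀ q ∈ level, q.2 ≤ videos.length ∧ q.1 ≤ q.2 ∧
        (videos.length + 1) / 2 ^ j ≤ q.2 - q.1 + 1 ∧ q.2 - q.1 + 1 ≤ (videos.length + 1) / 2 ^ j + 1) →
    final.length = 2 ^ j - 1 →
    eff ≤ ((2 ^ Nat.log2 (videos.length + 1) : Nat) : Int) - 1 →
    pvALoop eff final (level.map (pvSegF videos)) fuel = pvBLoop videos eff final level fuel := by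
  intro fuel
  induction fuel with
  | zero => intro j level final _ _ _ _ _; rfl
  | succ fuel ih =>
    intro j level final hj hlen hq hfin heff
    have hk2 : 2 ^ Nat.log2 (videos.length + 1) ≤ videos.length + 1 :=
      Nat.log2_self_le (by omega)
    have hjk : 2 ^ (j + 1) ≤ 2 ^ Nat.log2 (videos.length + 1) :=
      Nat.pow_le_pow_right (by omega) (by omega)
    have hp2 : 2 ≤ (videos.length + 1) / 2 ^ j := by
      rw [Nat.le_div_iff_mul_le (Nat.two_pow_pos j)]
      have : 2 * 2 ^ j = 2 ^ (j + 1) := by ring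
      omega
    have hlevne : level ≠ [] := by
      intro h
      rw [h] at hlen
      have := Nat.two_pow_pos j
      simp at hlen
      omega
    have hq' : ∀ q ∈ level, q.1 < q.2 ∧ q.2 ≤ videos.length := by
      intro q hqm
      obtain ⟨a, b, c, _⟩ := hq q hqm
      exact ⟨by omega, a⟩
    have hsync := pv_emit_sync videos eff level final [] [] hq' (by simp)
    simp only [pvALoop, pvBLoop, if_neg hlevne]
    cases hA : pvAEmit eff final (level.map (pvSegF videos)) [] with
    | inl ra =>
      cases hB : pvBLevel videos eff final level [] with
      | inl rb => rw [hA, hB] at hsync; exact hsync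
      | inr rb => rw [hA, hB] at hsync; exact absurd hsync (by simp)
    | inr ra =>
      cases hB : pvBLevel videos eff final level [] with
      | inl rb => rw [hA, hB] at hsync; exact absurd hsync (by simp)
      | inr rb =>
        rw [hA, hB] at hsync
        obtain ⟨fa, pa⟩ := ra
        obtain ⟨fb, nb⟩ := rb
        obtain ⟨e1, e2, e3, e4, e5, e6⟩ := hsync
        subst e1
        show pvALoop eff fa (pa.foldl (fun aux p => aux ++ [(pvSplit_list p).1, (pvSplit_list p).2]) []) fuel
          = pvBLoop videos eff fa nb fuel
        rw [e3]
        have hfa : fa.length = 2 ^ (j + 1) - 1 := by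
          rw [e2, hfin, hlen]
          have := Nat.two_pow_pos j
          have : 2 ^ (j + 1) = 2 * 2 ^ j := by ring
          omega
        have hfalt : (fa.length : Int) < eff := e6 hlevne
        have hj1 : j + 1 < Nat.log2 (videos.length + 1) := by
      -- 2^(j+1) - 1 = fa.length < eff ≤ 2^k - 1
          have h1 : (2 ^ (j + 1) : Nat) < 2 ^ Nat.log2 (videos.length + 1) := by
            have := Nat.two_pow_pos (j + 1)
            have := Nat.two_pow_pos (Nat.log2 (videos.length + 1))
            omega
          exact (Nat.pow_lt_pow_iff_right (by omega)).mp h1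
        have hPP : (videos.length + 1) / 2 ^ j / 2 = (videos.length + 1) / 2 ^ (j + 1) := by
          rw [Nat.div_div_eq_div_mul, ← pow_succ]
        apply ih (j + 1) nb fa hj1
        · rw [e4, List.nil_append, pvChild_flatMap_length, hlen, pow_succ]
          ring
        · intro q' hq'm
          rw [e4, List.nil_append, List.mem_flatMap] at hq'm
          obtain ⟨q, hqm, hchild⟩ := hq'm
          obtain ⟨lo, hi⟩ := q
          obtain ⟨ha, hb, hc, hd⟩ := hq (lo, hi) hqm
          simp only at ha hb hc hd
          simp only [pvChild, List.mem_cons, List.not_mem_nil, or_false] at hchild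
          rcases hchild with h | h <;> subst h <;> simp only <;>
            refine ⟨by omega, by omega, by omega, by omega⟩
        · exact hfa
        · exact heff

-- ===== VERDICT (by name: the statement is the Claim_ definition above) =====
theorem reduce_videos_to_download_spec : Claim_equal_reduce_videos_to_download := by
  intro vl m _ hPre
  obtain ⟨hne, hmin⟩ := hPre
  unfold Spec_reduce_videos_to_download reduce_videos_to_download reduce_videos_to_download_alt
  rw [if_neg hne]
  have hn1 : 1 ≤ vl.length := List.length_pos_iff.mpr hne
  have hk1 : 1 ≤ Nat.log2 (vl.length + 1) := (Nat.le_log2 (by omega)).mpr (by omega)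
  have hsync := pv_loop_sync vl (min (vl.length : Int) m) (vl.length + 2) 0 [(0, vl.length)] []
    (by omega) (by simp)
    (by
      intro q hqm
      simp only [List.mem_singleton] at hqm
      subst hqm
      simp only [pow_zero, Nat.div_one]
      omega)
    (by simp)
    (by push_cast; exact hmin)
  rw [show List.map (pvSegF vl) [(0, vl.length)] = [vl] by simp [pvSegF, pvSeg_full]] at hsync
  exact hsync

@[simp] theorem reduce_videos_to_download_raises : Claim_raises_reduce_videos_to_download := by
  unfold Claim_raises_reduce_videos_to_download
  constructor
  · rintro vl m _ (h | h) ⟨h1, h2⟩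
    · exact h1 h
    · omega
  · refine ⟨by decide, by decide, by decide⟩
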